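-- pv_equiv track=rewrite | github.com/FinalisCore/finalis-core | scripts/attack_model.py | split_runs
-- ===== SOURCE A (Python) =====
-- def split_runs(total_runs: int, jobs: int) -> list[tuple[int, int]]:
--     worker_count = max(1, min(jobs, total_runs))
--     base = total_runs // worker_count
--     remainder = total_runs % worker_count
--     ranges: list[tuple[int, int]] = []
--     start = 0
--     for index in range(worker_count):
--         runs = base + (1 if index < remainder else 0)
--         ranges.append((start, runs))
--         start += runs
--     return ranges
-- ===== SOURCE B (Python) =====
-- def split_runs(total_runs: int, jobs: int) -> list[tuple[int, int]]:
--     workers = min(max(jobs, 1), max(total_runs, 1))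
--     base, rem = divmod(total_runs, workers)
--     big = [((base + 1) * i, base + 1) for i in range(rem)]
--     small = [((base + 1) * rem + base * j, base) for j in range(workers - rem)]
--     return big + small
-- ===== Notes on version B (the rewrite author's own statement) =====
-- stated objective: alternative
-- what changed: Instead of one loop threading a running start, B builds the result as two staged segments: rem workers of size base+1 with starts (base+1)*i, then workers-rem workers of size base with starts (base+1)*rem + base*j, concatenated.
import Mathlib
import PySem

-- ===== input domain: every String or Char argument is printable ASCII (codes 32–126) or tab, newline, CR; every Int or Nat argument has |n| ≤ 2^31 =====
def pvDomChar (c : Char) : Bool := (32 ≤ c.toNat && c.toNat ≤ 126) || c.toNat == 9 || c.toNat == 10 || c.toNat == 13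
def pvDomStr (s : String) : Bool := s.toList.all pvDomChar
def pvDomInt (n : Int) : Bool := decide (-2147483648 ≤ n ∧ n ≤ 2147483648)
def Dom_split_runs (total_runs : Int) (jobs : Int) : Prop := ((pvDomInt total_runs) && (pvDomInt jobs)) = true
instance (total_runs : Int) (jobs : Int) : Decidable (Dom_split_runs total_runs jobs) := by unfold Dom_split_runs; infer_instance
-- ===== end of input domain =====

-- B replaces A's single loop with a running start by a staged construction: the rem oversized
-- ranges and the workers-rem base-sized ranges are built as two independent segments with
-- closed-form starts and concatenated (objective: alternative decomposition, same cost).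

-- ===== PORT A =====
def split_runs (total_runs : Int) (jobs : Int) : List (Int × Int) :=
  let worker_count := max 1 (min jobs total_runs)
  let base := PySem.Int.floordiv total_runs worker_count
  let remainder := PySem.Int.mod total_runs worker_count
  let st := (PySem.List.pyRange 0 worker_count 1).foldl
    (fun (acc : List (Int × Int) × Int) idx =>
      let runs := base + (if idx < remainder then 1 else 0)
      (acc.1 ++ [(acc.2, runs)], acc.2 + runs))
    ([], 0)
  st.1

-- ===== PORT B =====
def split_runs_alt (total_runs : Int) (jobs : Int) : List (Int × Int) :=
  let workers := min (max jobs 1) (max total_runs 1)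
  let base := PySem.Int.floordiv total_runs workers
  let rem := PySem.Int.mod total_runs workers
  let big := (PySem.List.pyRange 0 rem 1).map (fun i => ((base + 1) * i, base + 1))
  let small := (PySem.List.pyRange 0 (workers - rem) 1).map
    (fun j => ((base + 1) * rem + base * j, base))
  big ++ small

-- ===== PRECONDITION & SPEC =====
def Spec_split_runs (total_runs : Int) (jobs : Int) (out : List (Int × Int)) : Prop := out = split_runs_alt total_runs jobs
instance (total_runs : Int) (jobs : Int) (out : List (Int × Int)) : Decidable (Spec_split_runs total_runs jobs out) := by unfold Spec_split_runs; infer_instance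

-- ===== CLAIM (what is proved, stated in full; the proofs are below) =====
def Claim_equal_split_runs : Prop := ∀ (total_runs : Int) (jobs : Int), Dom_split_runs total_runs jobs → Spec_split_runs total_runs jobs (split_runs total_runs jobs)

-- ===== LEMMAS AND PROOFS =====

-- Loop invariant for A: after n iterations the accumulated list is the map of the closed form
-- base*i + min i rem and the running start equals base*n + min n rem (needs 0 ≤ rem).
theorem split_runs_loop_eq (base rem : Int) (hrem : 0 ≤ rem) (n : Nat) :
    ((List.range n).map (fun k : Nat => (k:Int))).foldl
      (fun (acc : List (Int × Int) × Int) idx =>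
        (acc.1 ++ [(acc.2, base + (if idx < rem then 1 else 0))],
         acc.2 + (base + (if idx < rem then 1 else 0))))
      ([], 0)
    = (((List.range n).map (fun k : Nat => (k:Int))).map
        (fun i => (base * i + min i rem, base + (if i < rem then 1 else 0))),
       base * n + min (n : Int) rem) := by
  induction n with
  | zero => simp; omega
  | succ m ih =>
    rw [List.range_succ]
    simp only [List.map_append, List.foldl_append, List.map_cons, List.map_nil, List.foldl_cons,
      List.foldl_nil, ih, Prod.mk.injEq]
    refine ⟨trivial, ?_⟩
    push_cast
    rw [mul_add_one]
    split_ifs with h <;> omega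

-- The closed-form map over the full range splits into the two closed-form segments of B.
theorem closed_form_split (base rem wc : Int) (h0 : 0 ≤ rem) (h1 : rem ≤ wc) :
    (PySem.List.pyRange 0 wc 1).map
      (fun i => (base * i + min i rem, base + (if i < rem then 1 else 0)))
    = (PySem.List.pyRange 0 rem 1).map (fun i => ((base + 1) * i, base + 1))
      ++ (PySem.List.pyRange 0 (wc - rem) 1).map
          (fun j => ((base + 1) * rem + base * j, base)) := by
  rw [PySem.List.pyRange_one_append 0 rem wc h0 h1, List.map_append]
  congr 1
  · apply List.map_congr_left
    intro i hi
    have := (PySem.List.mem_pyRange_one).1 hi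
    have hmin : min i rem = i := by omega
    rw [hmin, if_pos this.2]
    exact Prod.ext (by ring) rfl
  · rw [PySem.List.pyRange_one rem wc, PySem.List.pyRange_one 0 (wc - rem), List.map_map,
      List.map_map]
    simp only [Int.sub_zero]
    apply List.map_congr_left
    intro k hk
    have hk' : (k : Int) ≥ 0 := Int.natCast_nonneg k
    have hge : rem ≤ rem + (k : Int) := by omega
    simp only [Function.comp]
    have hmin : min (rem + (k : Int)) rem = rem := by omega
    rw [hmin, if_neg (by omega)]
    exact Prod.ext (by ring) (by ring)

theorem split_runs_eq_alt (total_runs jobs : Int) :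
    split_runs total_runs jobs = split_runs_alt total_runs jobs := by
  unfold split_runs split_runs_alt
  have hwc_eq : min (max jobs 1) (max total_runs 1) = max 1 (min jobs total_runs) := by omega
  rw [hwc_eq]
  set wc := max 1 (min jobs total_runs) with hwc_def
  have hwc : (0:Int) < wc := by omega
  have hrem0 : 0 ≤ PySem.Int.mod total_runs wc := PySem.Int.mod_nonneg _ hwc
  have hrem1 : PySem.Int.mod total_runs wc < wc := PySem.Int.mod_lt _ hwc
  rw [← closed_form_split _ _ wc hrem0 (le_of_lt hrem1)]
  simp only [PySem.List.pyRange_one 0 wc, Int.sub_zero, Int.zero_add]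
  rw [split_runs_loop_eq _ _ hrem0]

-- ===== VERDICT (by name: the statement is the Claim_ definition above) =====
theorem split_runs_spec : Claim_equal_split_runs := by
  intro t j _
  exact split_runs_eq_alt t j
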